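-- pv_equiv track=rewrite | github.com/jjyr/mmr.py | mmr.py | left_peak_height_pos
-- ===== SOURCE A (Python) =====
-- def sibling_offset(height) -> int:
--     return 2 ** (height + 1) - 1
--
-- def left_peak_height_pos(mmr_size: int) -> (int, int):
--     height = 0
--     prev_pos = 0
--     # try to get left peak
--     while True:
--         pos = sibling_offset(height) - 1
--         # once pos is out of length we consider previous pos is left peak
--         if pos > mmr_size - 1:
--             return (height - 1, prev_pos)
--         else:
--             height += 1
--             prev_pos = pos
-- ===== SOURCE B (Python) =====
-- def left_peak_height_pos(mmr_size: int) -> (int, int):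
--     # closed form: no left peak for empty MMR; otherwise the leftmost peak
--     # has height floor(log2(mmr_size+1)) - 1 and position 2**(height+1) - 2
--     if mmr_size <= 0:
--         return (-1, 0)
--     height = (mmr_size + 1).bit_length() - 2
--     return (height, 2 ** (height + 1) - 2)
-- ===== Notes on version B (the rewrite author's own statement) =====
-- stated objective: faster
-- what changed: Replaces the doubling while-loop with a closed form: height = (mmr_size+1).bit_length() - 2 and position 2**(height+1) - 2, with a direct (-1, 0) return for mmr_size <= 0.
import Mathlib
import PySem

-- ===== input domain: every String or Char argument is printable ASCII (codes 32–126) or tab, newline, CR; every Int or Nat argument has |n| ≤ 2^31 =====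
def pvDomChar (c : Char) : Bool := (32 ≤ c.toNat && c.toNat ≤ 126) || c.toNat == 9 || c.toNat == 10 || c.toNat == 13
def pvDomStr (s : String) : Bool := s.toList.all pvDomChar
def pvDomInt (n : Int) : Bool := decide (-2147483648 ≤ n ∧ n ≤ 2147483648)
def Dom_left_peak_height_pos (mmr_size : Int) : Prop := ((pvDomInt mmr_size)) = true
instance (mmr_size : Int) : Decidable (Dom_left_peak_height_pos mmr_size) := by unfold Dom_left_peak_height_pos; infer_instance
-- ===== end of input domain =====

-- B replaces A's doubling while-loop with an O(1) closed form via bit_length (return value only; faster).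

-- ===== PORT A =====
def sibling_offset (height : Int) : Int := 2 ^ (height + 1).toNat - 1

-- the 'while True' loop of A; Python's height takes the values 0,1,2,…, so it is a Nat here
def left_peak_loop (mmr_size : Int) (height : Nat) (prev_pos : Int) : Int × Int :=
  let pos := sibling_offset (height : Int) - 1
  if pos > mmr_size - 1 then ((height : Int) - 1, prev_pos)
  else left_peak_loop mmr_size (height + 1) pos
termination_by (mmr_size + 1 - height).toNat
decreasing_by
  rename_i hle
  simp only [pos, sibling_offset, not_lt] at hle
  have h1 : ((height : Int) + 1).toNat = height + 1 := by omega
  rw [h1] at hle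
  have h2 : (height : Int) + 1 < 2 ^ (height + 1) := by
    have := Nat.lt_two_pow_self (n := height + 1)
    exact_mod_cast this
  omega

def left_peak_height_pos (mmr_size : Int) : Int × Int :=
  left_peak_loop mmr_size 0 0

-- ===== PORT B =====
def left_peak_height_pos_alt (mmr_size : Int) : Int × Int :=
  if mmr_size ≤ 0 then (-1, 0)
  else
    let height : Int := (PySem.Int.bitLength (mmr_size + 1) : Int) - 2
    (height, 2 ^ (height + 1).toNat - 2)

-- ===== PRECONDITION & SPEC =====
def Spec_left_peak_height_pos (mmr_size : Int) (out : Int × Int) : Prop := out = left_peak_height_pos_alt mmr_size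
instance (mmr_size : Int) (out : Int × Int) : Decidable (Spec_left_peak_height_pos mmr_size out) := by unfold Spec_left_peak_height_pos; infer_instance

-- ===== CLAIM (what is proved, stated in full; the proofs are below) =====
def Claim_equal_left_peak_height_pos : Prop := ∀ (mmr_size : Int), Dom_left_peak_height_pos mmr_size → Spec_left_peak_height_pos mmr_size (left_peak_height_pos mmr_size)

-- ===== LEMMAS AND PROOFS =====

-- invariant: at height h ≥ 1 with prev_pos = 2^h - 2 and 2^h ≤ mmr_size + 1, the loop
-- returns (L - 2, 2^(L-1) - 2) where L = bitLength (mmr_size + 1)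
lemma left_peak_loop_closed (m : Int) (hm : 1 ≤ m) :
    ∀ (d h : Nat), 1 ≤ h → PySem.Int.bitLength (m + 1) = h + d →
      (2 : Int) ^ h ≤ m + 1 →
      left_peak_loop m h ((2 : Int) ^ h - 2) =
        ((PySem.Int.bitLength (m + 1) : Int) - 2,
          (2 : Int) ^ (PySem.Int.bitLength (m + 1) - 1) - 2) := by
  have hpos : (0 : Int) < m + 1 := by omega
  have hge0 : 2 ^ (PySem.Int.bitLength (m + 1) - 1) ≤ (m + 1).natAbs :=
    PySem.Int.two_pow_bitLength_le (m + 1) (by omega)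
  have hlt0 : (m + 1).natAbs < 2 ^ PySem.Int.bitLength (m + 1) :=
    PySem.Int.lt_two_pow_bitLength (m + 1)
  set L : ℕ := PySem.Int.bitLength (m + 1) with hLdef
  have hAbs : ((m + 1).natAbs : Int) = m + 1 := by omega
  have hlt' : (m + 1 : Int) < 2 ^ L := by rw [← hAbs]; exact_mod_cast hlt0
  have hge' : (2 : Int) ^ (L - 1) ≤ m + 1 := by rw [← hAbs]; exact_mod_cast hge0
  intro d
  induction d with
  | zero =>
      intro h h1 hL hle
      exfalso
      rw [hL] at hlt'
      simp at hlt'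
      omega
  | succ d ih =>
      intro h h1 hL hle
      rw [left_peak_loop.eq_def]
      simp only [sibling_offset]
      have hnat : ((h : Int) + 1).toNat = h + 1 := by omega
      rw [hnat]
      by_cases hc : (2 : Int) ^ (h + 1) - 1 - 1 > m - 1
      · -- loop ends: h is the last height with 2^h ≤ m+1, so bitLength (m+1) = h + 1
        rw [if_pos hc]
        -- from 2^h ≤ m+1 < 2^L and 2^(L-1) ≤ m+1 < 2^(h+1) conclude L = h+1
        have e1 : h < L := by
          by_contra hcon
          rw [not_lt] at hcon
          have := pow_le_pow_right₀ (a := (2:Int)) (by norm_num) hcon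
          omega
        have e2 : L - 1 < h + 1 := by
          by_contra hcon
          rw [not_lt] at hcon
          have := pow_le_pow_right₀ (a := (2:Int)) (by norm_num) hcon
          omega
        have hLeq : L = h + 1 := by omega
        rw [hLeq, Nat.add_sub_cancel]
        simp only [Prod.mk.injEq]
        exact ⟨by push_cast; ring, trivial⟩
      · -- loop continues with height h+1, prev_pos = 2^(h+1) - 2
        rw [if_neg hc]
        have hle' : (2 : Int) ^ (h + 1) ≤ m + 1 := by omega
        have hL' : L = (h + 1) + d := by omega
        have := ih (h + 1) (by omega) hL' hle'
        rw [← this]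
        congr 1
        ring

-- ===== VERDICT (by name: the statement is the Claim_ definition above) =====
theorem left_peak_height_pos_spec : Claim_equal_left_peak_height_pos := by
  unfold Claim_equal_left_peak_height_pos Spec_left_peak_height_pos
  intro m _
  unfold left_peak_height_pos left_peak_height_pos_alt
  rw [left_peak_loop.eq_def]
  simp only [sibling_offset]
  norm_num
  by_cases hm : m ≤ 0
  · rw [if_pos (by omega : m < 1), if_pos hm]
  · rw [if_neg (by omega : ¬ m < 1), if_neg hm]
    have hm' : 1 ≤ m := by omega
    -- first iteration reached height 1 with prev_pos 0 = 2^1 - 2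
    have h0 : (0 : Int) = (2 : Int) ^ 1 - 2 := by norm_num
    have hL1 : 1 ≤ PySem.Int.bitLength (m + 1) := by
      by_contra hcon
      have h0' : PySem.Int.bitLength (m + 1) = 0 := by omega
      have := PySem.Int.lt_two_pow_bitLength (m + 1)
      rw [h0'] at this
      simp at this
      omega
    have hmain := left_peak_loop_closed m hm' (PySem.Int.bitLength (m + 1) - 1) 1
      (by omega) (by omega) (by norm_num; omega)
    rw [h0, hmain]
    have hnat : ((PySem.Int.bitLength (m + 1) : Int) - 2 + 1).toNat
        = PySem.Int.bitLength (m + 1) - 1 := by omega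
    simp only [hnat]
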